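-- pv_equiv track=rewrite | github.com/itsmemdtofik/Python | Arrays/Easy/ReverseArrayIngroup.py | reverse_array_in_groups
-- ===== SOURCE A (Python) =====
-- def reverse_array_in_groups(arr, K):
--     """
--     Function to reverse every subarray formed by consecutive K elements.
--     """
--
--     # If the array is empty or length of array is less than 2, return the original array
--     if len(arr) == 0 or len(arr) < 2:
--         return arr
--
--     # Traverse the array in steps of K
--     for start in range(0, len(arr), K):
--         # Get the right pointer, ensuring it doesn't go out of bounds
--         left = start
--         right = min(start + K - 1, len(arr) - 1)
--
--         # Reverse the current group of K elements
--         while left < right: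
--             # Swap elements at left and right pointers
--             arr[left], arr[right] = arr[right], arr[left]
--             left += 1
--             right -= 1
--
--     return arr
-- ===== SOURCE B (Python) =====
-- def reverse_array_in_groups(arr, K):
--     """Reverse every consecutive K-element group, via in-place slice reversal."""
--     if len(arr) < 2:
--         return arr
--     for start in range(0, len(arr), K):
--         arr[start:start + K] = arr[start:start + K][::-1]
--     return arr
-- ===== Notes on version B (the rewrite author's own statement) =====
-- stated objective: simpler
-- what changed: The inner two-pointer while-loop with manual simultaneous swaps is removed entirely; each K-group is reversed by a single in-place slice assignment arr[start:start+K] = arr[start:start+K][::-1], leaving only the outer loop.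
import Mathlib
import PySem

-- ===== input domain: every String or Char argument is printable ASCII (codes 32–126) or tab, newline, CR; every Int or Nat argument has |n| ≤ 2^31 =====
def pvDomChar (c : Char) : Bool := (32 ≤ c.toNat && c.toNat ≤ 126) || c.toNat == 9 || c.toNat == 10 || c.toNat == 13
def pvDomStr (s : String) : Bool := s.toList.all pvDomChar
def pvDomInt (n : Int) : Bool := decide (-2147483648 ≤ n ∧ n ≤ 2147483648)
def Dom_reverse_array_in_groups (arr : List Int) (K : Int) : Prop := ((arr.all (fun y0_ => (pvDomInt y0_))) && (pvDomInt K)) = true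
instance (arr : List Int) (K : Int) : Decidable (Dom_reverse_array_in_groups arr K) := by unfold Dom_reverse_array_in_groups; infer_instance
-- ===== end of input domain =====

-- B replaces A's inner two-pointer swap loop by an in-place slice-reversal assignment (simpler).
-- In Python both A and B mutate the argument list in place; the equivalence proved here is about
-- the return value.

-- ===== PORT A =====
-- Python's simultaneous swap 'arr[l], arr[r] = arr[r], arr[l]'; Nat indices/getD are exact here
-- because every executed swap has 0 ≤ l < r < len(arr) (the while-guard of A).
def pvSwap (a : List Int) (i j : Nat) : List Int :=
  (a.set i (a.getD j 0)).set j (a.getD i 0)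

-- the inner 'while left < right' loop of A
def pvInner (a : List Int) (l r : Int) : List Int :=
  if l < r then pvInner (pvSwap a l.toNat r.toNat) (l + 1) (r - 1) else a
termination_by (r - l).toNat
decreasing_by omega

def reverse_array_in_groups (arr : List Int) (K : Int) : List Int :=
  if arr.length == 0 || decide (arr.length < 2) then arr
  else
    (PySem.List.pyRange 0 arr.length K).foldl
      (fun a start => pvInner a start (min (start + K - 1) ((a.length : Int) - 1))) arr

-- ===== PORT B =====
def reverse_array_in_groups_alt (arr : List Int) (K : Int) : List Int :=
  if decide (arr.length < 2) then arr
  else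
    (PySem.List.pyRange 0 arr.length K).foldl
      (fun a start =>
        -- slice assignment a[start:start+K] = a[start:start+K][::-1]; every executed start has
        -- 0 ≤ start (for K < 0 the range is empty), where take/++/drop is exactly Python's
        -- clamped slice-assignment semantics
        a.take start.toNat
          ++ (PySem.List.slice a (some start) (some (start + K))).reverse
          ++ a.drop (start + K).toNat)
      arr

-- ===== PRECONDITION & SPEC =====
-- Pre_ excludes exactly K = 0 with len(arr) ≥ 2, where Python's range(0, len, 0) raises ValueError
-- (in A and in B alike).
def Pre_reverse_array_in_groups (arr : List Int) (K : Int) : Prop := K ≠ 0 ∨ arr.length < 2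
instance (arr : List Int) (K : Int) : Decidable (Pre_reverse_array_in_groups arr K) := by unfold Pre_reverse_array_in_groups; infer_instance

def pvWitness_reverse_array_in_groups : List Int × Int := ([1, 2, 3, 4, 5], 2)

def Spec_reverse_array_in_groups (arr : List Int) (K : Int) (out : List Int) : Prop := out = reverse_array_in_groups_alt arr K
instance (arr : List Int) (K : Int) (out : List Int) : Decidable (Spec_reverse_array_in_groups arr K out) := by unfold Spec_reverse_array_in_groups; infer_instance

-- ===== CLAIM (what is proved, stated in full; the proofs are below) =====
def Claim_equal_reverse_array_in_groups : Prop := ∀ (arr : List Int) (K : Int), Dom_reverse_array_in_groups arr K → Pre_reverse_array_in_groups arr K → Spec_reverse_array_in_groups arr K (reverse_array_in_groups arr K)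

-- ===== LEMMAS AND PROOFS =====

-- Nat-indexed version of A's inner loop (its Int indices are always ≥ 0 while it runs)
def pvInnerN (a : List Int) (l r : Nat) : List Int :=
  if l < r then pvInnerN (pvSwap a l r) (l + 1) (r - 1) else a
termination_by r - l

theorem pvInner_eq_N (a : List Int) (l r : Int) (h0 : 0 ≤ l) :
    pvInner a l r = pvInnerN a l.toNat r.toNat := by
  fun_induction pvInner a l r with
  | case1 a l r h ih =>
    rw [pvInnerN]
    have h1 : l.toNat < r.toNat := by omega
    rw [if_pos h1, ih (by omega)]
    congr 1 <;> omega
  | case2 a l r h =>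
    rw [pvInnerN, if_neg (by omega)]

theorem length_pvSwap (a : List Int) (i j : Nat) : (pvSwap a i j).length = a.length := by
  simp [pvSwap]

theorem length_pvInnerN (a : List Int) (l r : Nat) : (pvInnerN a l r).length = a.length := by
  fun_induction pvInnerN a l r with
  | case1 a l r h ih => simpa [pvSwap] using ih
  | case2 => rfl

theorem getD_pvSwap (a : List Int) (i j m : Nat) (hi : i < a.length) (hj : j < a.length) :
    (pvSwap a i j).getD m 0 =
      if m = j then a.getD i 0 else if m = i then a.getD j 0 else a.getD m 0 := by
  unfold pvSwap
  rcases Nat.lt_or_ge m a.length with hm | hm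
  · by_cases hmj : m = j
    · subst hmj
      rw [List.getD_eq_getElem _ _ (by simpa using hm), if_pos rfl,
        List.getElem_set_self (by simpa using hm), List.getD_eq_getElem _ _ hi]
    · by_cases hmi : m = i
      · subst hmi
        rw [List.getD_eq_getElem _ _ (by simpa using hm), if_neg hmj, if_pos rfl,
          List.getElem_set_ne (by omega),
          List.getElem_set_self (by simpa using hm), List.getD_eq_getElem _ _ hj]
      · rw [List.getD_eq_getElem _ _ (by simpa using hm), if_neg hmj, if_neg hmi,
          List.getElem_set_ne (by omega),
          List.getElem_set_ne (by omega), List.getD_eq_getElem _ _ hm]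
  · rw [if_neg (by omega), if_neg (by omega)]
    rw [List.getD_eq_default _ _ (by simpa using hm), List.getD_eq_default _ _ hm]

theorem getD_pvInnerN (a : List Int) (l r : Nat) :
    r < a.length → ∀ k, (pvInnerN a l r).getD k 0 =
      if l ≤ k ∧ k ≤ r then a.getD (l + r - k) 0 else a.getD k 0 := by
  fun_induction pvInnerN a l r with
  | case1 a l r h ih =>
    intro hr k
    have hlen : (pvSwap a l r).length = a.length := length_pvSwap a l r
    rw [ih (by omega) k]
    have hi : l < a.length := by omega
    simp only [fun m => getD_pvSwap a l r m hi hr]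
    split_ifs <;> first | rfl | (exfalso; omega) | (congr 1; omega)
  | case2 a l r h =>
    intro hr k
    split_ifs with hc
    · congr 1; omega
    · rfl

theorem pvInnerN_eq (a : List Int) (l r : Nat) (hl : l ≤ r + 1) (hr : r < a.length) :
    pvInnerN a l r = a.take l ++ ((a.drop l).take (r + 1 - l)).reverse ++ a.drop (r + 1) := by
  have hlen : (pvInnerN a l r).length = a.length := length_pvInnerN a l r
  apply List.ext_getElem
  · simp [hlen]; omega
  · intro k h1 h2
    rw [← List.getD_eq_getElem (pvInnerN a l r) 0, getD_pvInnerN a l r hr k]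
    simp only [List.getElem_append]
    rw [hlen] at h1
    simp only [List.length_append, List.length_take, List.length_reverse, List.length_drop,
      List.getElem_take, List.getElem_reverse, List.getElem_drop] at h2 ⊢
    split_ifs
    all_goals try (exfalso; omega)
    all_goals (rw [List.getD_eq_getElem _ _ (by omega)])
    all_goals (congr 1; all_goals omega)

theorem body_eq (a : List Int) (s K : Int) (hs : 0 ≤ s) (hK : 1 ≤ K) :
    pvInner a s (min (s + K - 1) ((a.length : Int) - 1)) =
      a.take s.toNat ++ (PySem.List.slice a (some s) (some (s + K))).reverse
        ++ a.drop (s + K).toNat := by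
  rw [PySem.List.slice_toNat a hs (by omega)]
  by_cases hge : (a.length : Int) ≤ s
  · rw [pvInner, if_neg (by omega)]
    rw [List.take_of_length_le (by omega), List.drop_eq_nil_of_le (α := Int) (by omega),
      List.drop_eq_nil_of_le (α := Int) (by omega)]
    simp
  · rw [pvInner_eq_N a s _ hs,
      pvInnerN_eq a s.toNat _ (by omega) (by omega)]
    congr 1
    · congr 2
      rw [List.take_eq_take_iff]
      simp only [List.length_drop]
      omega
    · by_cases hle : (s + K).toNat ≤ a.length
      · congr 1; omega
      · rw [List.drop_eq_nil_of_le (by omega), List.drop_eq_nil_of_le (by omega)]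

-- ===== VERDICT (by name: the statement is the Claim_ definition above) =====
theorem reverse_array_in_groups_spec : Claim_equal_reverse_array_in_groups := by
  intro arr K hdom hpre
  unfold Spec_reverse_array_in_groups reverse_array_in_groups reverse_array_in_groups_alt
  by_cases hsmall : arr.length < 2
  · rw [if_pos (by simp [hsmall]), if_pos (by simp [hsmall])]
  · have hK : K ≠ 0 := hpre.resolve_right hsmall
    have g1 : ¬((arr.length == 0 || decide (arr.length < 2)) = true) := by
      simp
      refine ⟨fun h => ?_, by omega⟩
      subst h; simp at hsmall
    have g2 : ¬(decide (arr.length < 2) = true) := by simpa using hsmall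
    rw [if_neg g1, if_neg g2]
    by_cases hKpos : 1 ≤ K
    · apply PySem.List.foldl_congr_mem
      intro acc s hmem
      have hm := (PySem.List.mem_pyRange_iff_of_pos (by omega) s).mp hmem
      exact body_eq acc s K hm.1 hKpos
    · have hempty : PySem.List.pyRange 0 arr.length K = [] := by
        rw [PySem.List.pyRange_of_neg _ _ (by omega), if_neg (by omega)]
        simp
      rw [hempty]
      rfl
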